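-- pv_equiv track=rewrite | github.com/pwmcclung/codeWars2 | minminmax.py | minMinMax
-- ===== SOURCE A (Python) =====
-- def minMinMax(arr):
--     smallest = min(arr)
--     largest = max(arr)
--     newArr = []
--     i = smallest
--     while i <=largest:
--         i += 1
--         newArr.append(i)
--     list2 = []
--     for el in newArr:
--         if el not in arr:
--             list2.append(el)
--     minAbsent = list2[0]
--     return [smallest, minAbsent, largest]
-- ===== SOURCE B (Python) =====
-- def minMinMax(arr):
--     smallest = min(arr)
--     largest = max(arr)
--     expected = smallest + 1
--     for v in sorted(arr):
--         if v == expected: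
--             expected += 1
--         elif v > expected:
--             break
--     return [smallest, expected, largest]
-- ===== Notes on version B (the rewrite author's own statement) =====
-- stated objective: faster
-- what changed: Instead of materialising the whole range min+1..max+1 and filtering it with a quadratic membership scan, B sorts the array once and finds the first gap above the minimum in a single pass with an 'expected' pointer.
import Mathlib
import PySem

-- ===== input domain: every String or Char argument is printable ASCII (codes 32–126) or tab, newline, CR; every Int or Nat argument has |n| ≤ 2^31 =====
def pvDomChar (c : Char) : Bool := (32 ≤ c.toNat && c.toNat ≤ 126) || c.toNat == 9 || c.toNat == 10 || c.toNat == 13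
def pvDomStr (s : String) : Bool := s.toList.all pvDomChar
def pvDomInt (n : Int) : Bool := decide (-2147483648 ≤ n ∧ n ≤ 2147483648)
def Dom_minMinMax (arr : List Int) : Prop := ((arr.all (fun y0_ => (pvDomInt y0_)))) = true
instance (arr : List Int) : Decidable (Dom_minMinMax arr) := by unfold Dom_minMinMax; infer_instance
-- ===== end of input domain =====

-- B replaces A's full candidate range + quadratic membership filter by one sorted pass
-- that finds the first gap above the minimum (objective: faster).

-- ===== PORT A =====
-- the 'while i <= largest: i += 1; newArr.append(i)' loop, with its accumulator
def pvBuild (largest i : Int) (acc : List Int) : List Int :=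
  if i ≤ largest then pvBuild largest (i + 1) (acc ++ [i + 1]) else acc
termination_by (largest + 1 - i).toNat
decreasing_by all_goals omega

def minMinMax (arr : List Int) : List Int :=
  match PySem.List.min? arr (fun x => x), PySem.List.max? arr (fun x => x) with
  | some smallest, some largest =>
    let newArr := pvBuild largest smallest []
    let list2 := newArr.foldl (fun acc el => if el ∈ arr then acc else acc ++ [el]) []
    match PySem.List.pyGet? list2 0 with
    | some minAbsent => [smallest, minAbsent, largest]
    | none => []          -- list2[0] IndexError (unreachable for nonempty arr)
  | _, _ => []            -- min(arr) ValueError on empty arr, excluded by Pre_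

-- ===== PORT B =====
-- the for-loop over sorted(arr) with the 'expected' pointer and its break
def pvScanGap : List Int → Int → Int
  | [], e => e
  | v :: rest, e =>
    if v = e then pvScanGap rest (e + 1)
    else if v > e then e
    else pvScanGap rest e

def minMinMax_alt (arr : List Int) : List Int :=
  match PySem.List.min? arr (fun x => x) with
  | none => []            -- min(arr) ValueError on empty arr, excluded by Pre_
  | some smallest =>
    match PySem.List.max? arr (fun x => x) with
    | none => []
    | some largest =>
      [smallest, pvScanGap (PySem.List.sorted arr (fun x => x) false) (smallest + 1), largest]

-- ===== PRECONDITION & SPEC =====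
-- A (and B) raise ValueError on the empty list; only that input is excluded.
def Pre_minMinMax (arr : List Int) : Prop := arr ≠ []
instance (arr : List Int) : Decidable (Pre_minMinMax arr) := by unfold Pre_minMinMax; infer_instance
def pvWitness_minMinMax : List Int := [0]

def Spec_minMinMax (arr : List Int) (out : List Int) : Prop := out = minMinMax_alt arr
instance (arr : List Int) (out : List Int) : Decidable (Spec_minMinMax arr out) := by unfold Spec_minMinMax; infer_instance

-- ===== CLAIM (what is proved, stated in full; the proofs are below) =====
def Claim_equal_minMinMax : Prop := ∀ (arr : List Int), Dom_minMinMax arr → Pre_minMinMax arr → Spec_minMinMax arr (minMinMax arr)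

-- ===== LEMMAS AND PROOFS =====

/-- "m is the first value ≥ e absent from arr". -/
def pvIsFirst (arr : List Int) (e m : Int) : Prop :=
  e ≤ m ∧ m ∉ arr ∧ ∀ k, e ≤ k → k < m → k ∈ arr

theorem pvIsFirst_uniq {arr : List Int} {e m m' : Int}
    (h : pvIsFirst arr e m) (h' : pvIsFirst arr e m') : m = m' := by
  obtain ⟨he, hm, hall⟩ := h
  obtain ⟨he', hm', hall'⟩ := h'
  by_contra hne
  rcases lt_or_gt_of_ne hne with hlt | hgt
  · exact hm (hall' m he hlt)
  · exact hm' (hall m' he' hgt)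

-- ---- B side ----

theorem pvScanGap_ge : ∀ (s : List Int) (e : Int), e ≤ pvScanGap s e := by
  intro s
  induction s with
  | nil => intro e; simp [pvScanGap]
  | cons v rest ih =>
    intro e
    simp only [pvScanGap]
    split_ifs with h1 h2
    · have := ih (e + 1); omega
    · omega
    · exact ih e

theorem pvScanGap_spec : ∀ (s : List Int) (e : Int), s.Pairwise (· ≤ ·) →
    pvScanGap s e ∉ s ∧ ∀ k, e ≤ k → k < pvScanGap s e → k ∈ s := by
  intro s
  induction s with
  | nil => intro e _; simp [pvScanGap]
  | cons v rest ih =>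
    intro e hp
    have hle : ∀ x ∈ rest, v ≤ x := (List.pairwise_cons.mp hp).1
    have hpr : rest.Pairwise (· ≤ ·) := (List.pairwise_cons.mp hp).2
    simp only [pvScanGap]
    split_ifs with h1 h2
    · -- v = e, recurse with e+1
      obtain ⟨hnot, hmem⟩ := ih (e + 1) hpr
      have hge := pvScanGap_ge rest (e + 1)
      constructor
      · intro hin
        rcases List.mem_cons.mp hin with h | h
        · omega
        · exact hnot h
      · intro k hk1 hk2
        by_cases hke : k = e
        · subst hke; subst h1; exact List.mem_cons_self
        · exact List.mem_cons_of_mem _ (hmem k (by omega) hk2)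
    · -- v > e, return e
      constructor
      · intro hin
        rcases List.mem_cons.mp hin with h | h
        · omega
        · have := hle e h; omega
      · intro k hk1 hk2; omega
    · -- v < e, skip
      obtain ⟨hnot, hmem⟩ := ih e hpr
      have hge := pvScanGap_ge rest e
      constructor
      · intro hin
        rcases List.mem_cons.mp hin with h | h
        · omega
        · exact hnot h
      · intro k hk1 hk2
        exact List.mem_cons_of_mem _ (hmem k hk1 hk2)

theorem pvScanGap_isFirst (arr : List Int) (e : Int) :
    pvIsFirst arr e (pvScanGap (PySem.List.sorted arr (fun x => x) false) e) := by
  set s := PySem.List.sorted arr (fun x => x) false with hs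
  have hp : s.Pairwise (· ≤ ·) := PySem.List.sorted_pairwise arr (fun x => x)
  obtain ⟨hnot, hmem⟩ := pvScanGap_spec s e hp
  refine ⟨pvScanGap_ge s e, ?_, ?_⟩
  · intro h; exact hnot ((PySem.List.mem_sorted arr (fun x => x) false _).mpr h)
  · intro k hk1 hk2; exact (PySem.List.mem_sorted arr (fun x => x) false k).mp (hmem k hk1 hk2)

-- ---- A side ----

theorem pvBuild_acc (b j : Int) (acc : List Int) : pvBuild b j acc = acc ++ pvBuild b j [] := by
  by_cases h : j ≤ b
  · conv_lhs => rw [pvBuild]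
    conv_rhs => rw [pvBuild]
    simp only [if_pos h, List.nil_append]
    rw [pvBuild_acc b (j + 1) (acc ++ [j + 1]), pvBuild_acc b (j + 1) [j + 1]]
    simp
  · conv_lhs => rw [pvBuild]
    conv_rhs => rw [pvBuild]
    simp [h]
termination_by (b + 1 - j).toNat
decreasing_by all_goals omega

theorem pvBuild_mem (b i x : Int) : x ∈ pvBuild b i [] ↔ i < x ∧ x ≤ b + 1 := by
  by_cases h : i ≤ b
  · rw [pvBuild]
    simp only [if_pos h, List.nil_append]
    rw [pvBuild_acc b (i + 1) [i + 1], List.singleton_append, List.mem_cons,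
      pvBuild_mem b (i + 1) x]
    omega
  · rw [pvBuild]
    simp only [if_neg h, List.not_mem_nil, false_iff]
    omega
termination_by (b + 1 - i).toNat
decreasing_by all_goals omega

/-- The head of the filtered build list is the first value above i passing p. -/
theorem pvBuild_filter_head : ∀ (b i : Int) (p : Int → Bool) (m : Int),
    ((pvBuild b i []).filter p).head? = some m →
    p m = true ∧ i < m ∧ ∀ k, i < k → k < m → p k = false := by
  intro b i
  by_cases h : i ≤ b
  · intro p m hm
    rw [pvBuild] at hm
    simp only [if_pos h, List.nil_append] at hm
    rw [pvBuild_acc b (i + 1) [i + 1], List.singleton_append] at hm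
    rw [List.filter_cons] at hm
    by_cases hp : p (i + 1) = true
    · simp only [hp, if_pos, List.head?_cons, Option.some.injEq] at hm
      subst hm
      exact ⟨hp, by omega, fun k hk1 hk2 => by omega⟩
    · simp only [hp, Bool.false_eq_true, if_false] at hm
      obtain ⟨hpm, hlt, hall⟩ := pvBuild_filter_head b (i + 1) p m hm
      refine ⟨hpm, by omega, ?_⟩
      intro k hk1 hk2
      by_cases hk : k = i + 1
      · subst hk; simpa using hp
      · exact hall k (by omega) hk2
  · intro p m hm
    rw [pvBuild] at hm
    simp [h] at hm
termination_by b i => (b + 1 - i).toNat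
decreasing_by all_goals omega

theorem minMinMax_middle_isFirst (arr : List Int) (a b m : Int)
    (hmin : PySem.List.min? arr (fun x => x) = some a)
    (hmax : PySem.List.max? arr (fun x => x) = some b)
    (hm : ((pvBuild b a []).filter (fun el => decide (el ∉ arr))).head? = some m) :
    pvIsFirst arr (a + 1) m := by
  obtain ⟨hpm, hlt, hall⟩ := pvBuild_filter_head b a (fun el => decide (el ∉ arr)) m hm
  refine ⟨by omega, by simpa using hpm, ?_⟩
  intro k hk1 hk2
  have := hall k (by omega) hk2
  simpa using this

theorem list2_eq_filter (arr newArr : List Int) :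
    newArr.foldl (fun acc el => if el ∈ arr then acc else acc ++ [el]) [] =
      newArr.filter (fun el => decide (el ∉ arr)) := by
  induction newArr using List.reverseRecOn with
  | nil => simp
  | append_singleton xs x ih =>
    rw [List.foldl_append, List.filter_append, ih]
    simp only [List.foldl_cons, List.foldl_nil, List.filter_cons, List.filter_nil]
    by_cases h : x ∈ arr <;> simp [h]

theorem filter_nonempty (arr : List Int) (a b : Int)
    (hmin : PySem.List.min? arr (fun x => x) = some a)
    (hmax : PySem.List.max? arr (fun x => x) = some b) :
    ∃ m, ((pvBuild b a []).filter (fun el => decide (el ∉ arr))).head? = some m := by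
  have hmem : a ∈ arr := PySem.List.min?_mem hmin
  have hab : a ≤ b := by
    have := PySem.List.max?_isMax hmax a hmem
    simpa using this
  have hb1 : b + 1 ∉ arr := by
    intro hin
    have := PySem.List.max?_isMax hmax (b + 1) hin
    simp at this
  have hin : b + 1 ∈ (pvBuild b a []).filter (fun el => decide (el ∉ arr)) := by
    rw [List.mem_filter]
    exact ⟨(pvBuild_mem b a (b + 1)).mpr ⟨by omega, le_refl _⟩, by simpa using hb1⟩
  rcases hl : (pvBuild b a []).filter (fun el => decide (el ∉ arr)) with _ | ⟨x, xs⟩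
  · rw [hl] at hin; simp at hin
  · exact ⟨x, by simp⟩

-- ===== VERDICT (by name: the statement is the Claim_ definition above) =====
theorem minMinMax_spec : Claim_equal_minMinMax := by
  intro arr _ hpre
  unfold Spec_minMinMax minMinMax minMinMax_alt
  rcases hmin : PySem.List.min? arr (fun x => x) with _ | a
  · rcases arr with _ | ⟨y, t⟩
    · exact absurd rfl hpre
    · rw [PySem.List.min?_id_cons] at hmin
  rcases hmax : PySem.List.max? arr (fun x => x) with _ | b
  · rcases arr with _ | ⟨y, t⟩
    · exact absurd rfl hpre
    · rw [PySem.List.max?_id_cons] at hmax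
  simp only
  rw [list2_eq_filter]
  obtain ⟨m, hm⟩ := filter_nonempty arr a b hmin hmax
  have hget : PySem.List.pyGet? ((pvBuild b a []).filter (fun el => decide (el ∉ arr))) 0 = some m := by
    rcases hl : (pvBuild b a []).filter (fun el => decide (el ∉ arr)) with _ | ⟨x, xs⟩
    · rw [hl] at hm; simp at hm
    · rw [hl] at hm
      simp only [List.head?_cons, Option.some.injEq] at hm
      subst hm
      simp [PySem.List.pyGet?, PySem.List.pyIdx?]
  rw [hget]
  have h1 := minMinMax_middle_isFirst arr a b m hmin hmax hm
  have h2 := pvScanGap_isFirst arr (a + 1)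
  rw [pvIsFirst_uniq h1 h2]
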